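-- pv_equiv track=rewrite | github.com/seilk/Algorithm-PS | BAEKJOON/두 용액_2470.py | checkSign
-- ===== SOURCE A (Python) =====
-- def checkSign(lst):
--     cnt = 0
--     for i in lst:
--         cnt = cnt + 1 if i >= 0 else cnt - 1
--     if cnt == -len(lst):
--         return -1  # 모두 음수
--     elif cnt == len(lst):
--         return 1  # 모두 양수
--     return 0
-- ===== SOURCE B (Python) =====
-- def checkSign(lst):
--     if all(i < 0 for i in lst):
--         return -1
--     if all(i >= 0 for i in lst):
--         return 1
--     return 0
-- ===== Notes on version B (the rewrite author's own statement) =====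
-- stated objective: idiomatic
-- what changed: Replaces the +1/-1 counting accumulator compared against +/-len with two short-circuiting all() predicate scans (all(i<0) tested first so the empty list still yields -1).
import Mathlib
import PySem

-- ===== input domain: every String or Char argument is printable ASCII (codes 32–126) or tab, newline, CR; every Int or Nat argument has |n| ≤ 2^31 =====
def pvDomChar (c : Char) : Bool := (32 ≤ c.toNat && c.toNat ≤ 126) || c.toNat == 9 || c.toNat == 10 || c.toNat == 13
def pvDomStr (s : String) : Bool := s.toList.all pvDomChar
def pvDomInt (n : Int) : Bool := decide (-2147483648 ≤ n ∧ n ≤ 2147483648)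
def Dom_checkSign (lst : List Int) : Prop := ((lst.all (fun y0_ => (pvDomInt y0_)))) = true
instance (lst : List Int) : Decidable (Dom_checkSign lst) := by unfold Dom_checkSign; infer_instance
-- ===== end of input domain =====

-- B replaces A's +1/-1 counting accumulator with two short-circuiting all-predicate scans (idiomatic; same cost).


-- ===== PORT A =====
def checkSign (lst : List Int) : Int :=
  let cnt := lst.foldl (fun cnt i => if i ≥ 0 then cnt + 1 else cnt - 1) (0 : Int)
  if cnt = -(lst.length : Int) then -1
  else if cnt = (lst.length : Int) then 1
  else 0

-- ===== PORT B =====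
def checkSign_alt (lst : List Int) : Int :=
  if lst.all (fun i => i < 0) then -1
  else if lst.all (fun i => i ≥ 0) then 1
  else 0

-- ===== PRECONDITION & SPEC =====
def Spec_checkSign (lst : List Int) (out : Int) : Prop := out = checkSign_alt lst
instance (lst : List Int) (out : Int) : Decidable (Spec_checkSign lst out) := by unfold Spec_checkSign; infer_instance

-- ===== CLAIM (what is proved, stated in full; the proofs are below) =====
def Claim_equal_checkSign : Prop := ∀ (lst : List Int), Dom_checkSign lst → Spec_checkSign lst (checkSign lst)

-- ===== LEMMAS AND PROOFS =====
-- A's accumulator equals c + 2·(# of nonnegative elements) − length.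
theorem checkSign_fold_eq (lst : List Int) (c : Int) :
    lst.foldl (fun cnt i => if i ≥ 0 then cnt + 1 else cnt - 1) c
      = c + 2 * (lst.countP (fun i => decide (0 ≤ i)) : Int) - lst.length := by
  induction lst generalizing c with
  | nil => simp
  | cons x xs ih =>
    simp only [List.foldl_cons, List.countP_cons, List.length_cons, ih]
    by_cases h : (0 : Int) ≤ x <;> simp [h] <;> omega
theorem checkSign_spec_aux (lst : List Int) : checkSign lst = checkSign_alt lst := by
  have hfold := checkSign_fold_eq lst 0
  have hle : lst.countP (fun i => decide (0 ≤ i)) ≤ lst.length := List.countP_le_length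
  have hzero : (lst.countP (fun i => decide (0 ≤ i)) = 0) ↔ lst.all (fun i => i < 0) = true := by
    rw [List.countP_eq_zero, List.all_eq_true]
    constructor <;> intro h x hx <;> have := h x hx <;> simp_all
  have hall : (lst.countP (fun i => decide (0 ≤ i)) = lst.length) ↔ lst.all (fun i => i ≥ 0) = true := by
    rw [List.countP_eq_length, List.all_eq_true]
  simp only [checkSign, checkSign_alt, hfold]
  split_ifs
  all_goals first
    | rfl
    | (exfalso; simp only [← hzero, ← hall] at *; omega)

-- ===== VERDICT (by name: the statement is the Claim_ definition above) =====
theorem checkSign_spec : Claim_equal_checkSign := by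
  intro lst _
  unfold Spec_checkSign
  exact checkSign_spec_aux lst
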